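-- pv_equiv track=rewrite | github.com/NobuyukiInoue/LeetCode | Problems/1200_1299/1253_Reconstruct_a_2-Row_Binary_Matrix/Project_Python3/Reconstruct_a_2_Row_Binary_Matrix.py | reconstructMatrix2
-- ===== SOURCE A (Python) =====
-- def reconstructMatrix2(upper, lower, colsum):
--     # 880ms
--     matrix = [[ 0 for i in range(len(colsum))] for j in range(2)]
--     matsum = sum(colsum)
--     if matsum != upper+lower:
--         return []
--     colsum_counter = {}
--     for i in range(3):
--         colsum_counter[i] = 0
--     for i in colsum:
--         colsum_counter[i] +=1
--     upper_counter = upper - colsum_counter[2]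
--     lower_counter = lower - colsum_counter[2]
--     for col in range(len(colsum)):
--         if colsum[col] == 2:
--             matrix[0][col]=1
--             matrix[1][col]=1
--         elif colsum[col] ==0:
--             continue
--         else:
--             if upper_counter>0:
--                 matrix[0][col]=1
--                 matrix[1][col]=0
--                 upper_counter-=1
--             else:
--                 matrix[0][col]=0
--                 matrix[1][col]=1
--                 lower_counter -=1
--     if lower_counter != 0:
--         return []
--     return matrix
-- ===== SOURCE B (Python) =====
-- def reconstructMatrix2(upper, lower, colsum):
--     if sum(colsum) != upper + lower:
--         return []
--     ones = [i for i, c in enumerate(colsum) if c == 1]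
--     twos = [i for i, c in enumerate(colsum) if c == 2]
--     k = upper - len(twos)
--     if k < 0 or k > len(ones):
--         return []
--     top = [0] * len(colsum)
--     bottom = [0] * len(colsum)
--     for i in twos:
--         top[i] = 1
--         bottom[i] = 1
--     for i in ones[:k]:
--         top[i] = 1
--     for i in ones[k:]:
--         bottom[i] = 1
--     return [top, bottom]
-- ===== Notes on version B (the rewrite author's own statement) =====
-- stated objective: alternative
-- what changed: A makes one stateful left-to-right pass mutating a preallocated matrix while decrementing running upper/lower budgets and validates via a counter dict plus a terminal lower_counter check; B never scans with a budget: it collects the index lists of 1-columns and 2-columns, validates in closed form (k = upper - len(twos) must lie in [0, len(ones)]), and builds each row by scatter-assigning 1s at the index sets twos, ones[:k] (top) and ones[k:] (bottom).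
import Mathlib
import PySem

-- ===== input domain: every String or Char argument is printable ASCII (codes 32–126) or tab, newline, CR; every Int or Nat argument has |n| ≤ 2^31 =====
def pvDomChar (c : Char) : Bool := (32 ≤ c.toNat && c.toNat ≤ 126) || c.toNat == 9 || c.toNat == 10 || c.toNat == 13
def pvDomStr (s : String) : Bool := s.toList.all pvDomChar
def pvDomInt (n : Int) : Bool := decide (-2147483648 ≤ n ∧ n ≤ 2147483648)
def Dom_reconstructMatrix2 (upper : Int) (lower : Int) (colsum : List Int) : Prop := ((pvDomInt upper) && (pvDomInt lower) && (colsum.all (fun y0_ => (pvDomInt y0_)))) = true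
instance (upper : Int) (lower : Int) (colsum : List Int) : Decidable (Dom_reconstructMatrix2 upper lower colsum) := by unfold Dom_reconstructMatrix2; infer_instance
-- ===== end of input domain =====

-- B replaces A's stateful budget-decrementing scan over a preallocated matrix by an
-- index-set construction: collect the index lists of 1- and 2-columns, validate in
-- closed form, and scatter 1s at twos, ones[:k], ones[k:]; objective: alternative.


-- ===== PORT A =====
-- the body of A's 'for col in range(len(colsum))' loop; state = (matrix[0], matrix[1], upper_counter, lower_counter)
def stepA (colsum : List Int) (st : List Int × List Int × Int × Int) (col : Int) :
    List Int × List Int × Int × Int :=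
  if PySem.List.pyGetD colsum col 0 = 2 then
    (PySem.List.pySetD st.1 col 1, PySem.List.pySetD st.2.1 col 1, st.2.2.1, st.2.2.2)
  else if PySem.List.pyGetD colsum col 0 = 0 then st   -- continue
  else if st.2.2.1 > 0 then
    (PySem.List.pySetD st.1 col 1, PySem.List.pySetD st.2.1 col 0, st.2.2.1 - 1, st.2.2.2)
  else
    (PySem.List.pySetD st.1 col 0, PySem.List.pySetD st.2.1 col 1, st.2.2.1, st.2.2.2 - 1)

def reconstructMatrix2 (upper : Int) (lower : Int) (colsum : List Int) : List (List Int) :=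
  -- matrix = [[0 for i in range(len(colsum))] for j in range(2)], kept as its two rows
  let row0 : List Int := List.replicate colsum.length 0
  let row1 : List Int := List.replicate colsum.length 0
  let matsum := colsum.sum
  if matsum ≠ upper + lower then []
  else
    let counter0 : PySem.Dict Int Int :=
      (PySem.List.pyRange 0 3 1).foldl (fun d i => d.insert i 0) PySem.Dict.empty
    -- colsum_counter[i] += 1; exact under Pre_ (keys 0,1,2 all present); outside Pre_ Python raises KeyError
    let counter := colsum.foldl (fun (d : PySem.Dict Int Int) i => d.modify i 0 (· + 1)) counter0
    let uc := upper - counter.getD 2 0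
    let lc := lower - counter.getD 2 0
    let st := (PySem.List.pyRange 0 (PySem.List.len colsum) 1).foldl (stepA colsum) (row0, row1, uc, lc)
    if st.2.2.2 ≠ 0 then [] else [st.1, st.2.1]

-- ===== PORT B =====
def reconstructMatrix2_alt (upper : Int) (lower : Int) (colsum : List Int) : List (List Int) :=
  if colsum.sum ≠ upper + lower then []
  else
    let ones : List Int := ((PySem.List.enumerate colsum 0).filter (fun p => p.2 == 1)).map (·.1)
    let twos : List Int := ((PySem.List.enumerate colsum 0).filter (fun p => p.2 == 2)).map (·.1)
    let k : Int := upper - (twos.length : Int)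
    if k < 0 ∨ (ones.length : Int) < k then []
    else
      let top0 : List Int := List.replicate colsum.length 0
      let bot0 : List Int := List.replicate colsum.length 0
      let top1 := twos.foldl (fun l i => PySem.List.pySetD l i 1) top0
      let bot1 := twos.foldl (fun l i => PySem.List.pySetD l i 1) bot0
      let top2 := (PySem.List.slice ones none (some k)).foldl (fun l i => PySem.List.pySetD l i 1) top1
      let bot2 := (PySem.List.slice ones (some k) none).foldl (fun l i => PySem.List.pySetD l i 1) bot1
      [top2, bot2]

-- ===== PRECONDITION & SPEC =====
-- Pre_ excludes exactly the inputs on which A raises KeyError: sum(colsum) == upper+lower but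
-- some column value is outside {0,1,2} (colsum_counter[i] += 1 on a missing key).
def Pre_reconstructMatrix2 (upper : Int) (lower : Int) (colsum : List Int) : Prop :=
  colsum.sum = upper + lower → ∀ c ∈ colsum, c = 0 ∨ c = 1 ∨ c = 2
instance (upper : Int) (lower : Int) (colsum : List Int) : Decidable (Pre_reconstructMatrix2 upper lower colsum) := by unfold Pre_reconstructMatrix2; infer_instance

def pvWitness_reconstructMatrix2 : Int × Int × List Int := (2, 1, [2, 1, 0])

def Spec_reconstructMatrix2 (upper : Int) (lower : Int) (colsum : List Int) (out : List (List Int)) : Prop := out = reconstructMatrix2_alt upper lower colsum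
instance (upper : Int) (lower : Int) (colsum : List Int) (out : List (List Int)) : Decidable (Spec_reconstructMatrix2 upper lower colsum out) := by unfold Spec_reconstructMatrix2; infer_instance

-- ===== CLAIM (what is proved, stated in full; the proofs are below) =====
def Claim_equal_reconstructMatrix2 : Prop := ∀ (upper : Int) (lower : Int) (colsum : List Int), Dom_reconstructMatrix2 upper lower colsum → Pre_reconstructMatrix2 upper lower colsum → Spec_reconstructMatrix2 upper lower colsum (reconstructMatrix2 upper lower colsum)

-- ===== LEMMAS AND PROOFS =====

-- structural form of A's loop: processes the remaining columns, consing the produced cells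
def specA : List Int → Int → Int → List Int × List Int × Int × Int
  | [], uc, lc => ([], [], uc, lc)
  | c :: cs, uc, lc =>
    if c = 2 then
      let r := specA cs uc lc; (1 :: r.1, 1 :: r.2.1, r.2.2)
    else if c = 0 then
      let r := specA cs uc lc; (0 :: r.1, 0 :: r.2.1, r.2.2)
    else if uc > 0 then
      let r := specA cs (uc - 1) lc; (1 :: r.1, 0 :: r.2.1, r.2.2)
    else
      let r := specA cs uc (lc - 1); (0 :: r.1, 1 :: r.2.1, r.2.2)

lemma bridgeA : ∀ (rest pre p0 p1 : List Int) (uc lc : Int) (colsum : List Int),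
    colsum = pre ++ rest → p0.length = pre.length → p1.length = pre.length →
    (PySem.List.pyRange (pre.length : Int) (PySem.List.len colsum) 1).foldl (stepA colsum)
        (p0 ++ List.replicate rest.length 0, p1 ++ List.replicate rest.length 0, uc, lc)
      = (p0 ++ (specA rest uc lc).1, p1 ++ (specA rest uc lc).2.1, (specA rest uc lc).2.2) := by
  intro rest
  induction rest with
  | nil =>
    intro pre p0 p1 uc lc colsum hcs h0 h1
    subst hcs
    rw [PySem.List.pyRange_one_eq_nil (by simp)]
    simp [specA]
  | cons c cs ih =>
    intro pre p0 p1 uc lc colsum hcs h0 h1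
    subst hcs
    rw [PySem.List.pyRange_one_cons (by simp only [PySem.List.len_eq, List.length_append, List.length_cons]; omega)]
    rw [List.foldl_cons]
    have hget : PySem.List.pyGetD (pre ++ c :: cs) (pre.length : Int) 0 = c := by
      simp [List.getD]
    have hset0 : ∀ v : Int, PySem.List.pySetD (p0 ++ 0 :: List.replicate cs.length 0) (pre.length : Int) v
        = p0 ++ v :: List.replicate cs.length 0 := by
      intro v; rw [PySem.List.pySetD_natCast, ← h0]; simp
    have hset1 : ∀ v : Int, PySem.List.pySetD (p1 ++ 0 :: List.replicate cs.length 0) (pre.length : Int) v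
        = p1 ++ v :: List.replicate cs.length 0 := by
      intro v; rw [PySem.List.pySetD_natCast, ← h1]; simp
    have hrange : ((pre.length : Int) + 1) = ((pre ++ [c]).length : Int) := by simp
    have happ : pre ++ c :: cs = (pre ++ [c]) ++ cs := by simp
    simp only [List.length_cons, List.replicate_succ, stepA, hget]
    split_ifs with h2 h0c hu
    · rw [hset0 1, hset1 1]
      have := ih (pre ++ [c]) (p0 ++ [1]) (p1 ++ [1]) uc lc ((pre ++ [c]) ++ cs)
        rfl (by simp [h0]) (by simp [h1])
      rw [← hrange, ← happ] at this
      simp only [List.append_assoc, List.cons_append, List.nil_append] at this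
      rw [this]
      simp [specA, h2]
    · have := ih (pre ++ [c]) (p0 ++ [0]) (p1 ++ [0]) uc lc ((pre ++ [c]) ++ cs)
        rfl (by simp [h0]) (by simp [h1])
      rw [← hrange, ← happ] at this
      simp only [List.append_assoc, List.cons_append, List.nil_append] at this
      rw [this]
      simp [specA, h0c]
    · rw [hset0 1, hset1 0]
      have := ih (pre ++ [c]) (p0 ++ [1]) (p1 ++ [0]) (uc - 1) lc ((pre ++ [c]) ++ cs)
        rfl (by simp [h0]) (by simp [h1])
      rw [← hrange, ← happ] at this
      simp only [List.append_assoc, List.cons_append, List.nil_append] at this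
      rw [this]
      simp [specA, h2, h0c, hu]
    · rw [hset0 0, hset1 1]
      have := ih (pre ++ [c]) (p0 ++ [0]) (p1 ++ [1]) uc (lc - 1) ((pre ++ [c]) ++ cs)
        rfl (by simp [h0]) (by simp [h1])
      rw [← hrange, ← happ] at this
      simp only [List.append_assoc, List.cons_append, List.nil_append] at this
      rw [this]
      simp [specA, h2, h0c, hu]

lemma specA_lc : ∀ (cs : List Int) (uc lc : Int), (∀ c ∈ cs, c = 0 ∨ c = 1 ∨ c = 2) →
    (specA cs uc lc).2.2.2
      = lc - (List.count 1 cs : Int) + min (max uc 0) (List.count 1 cs : Int) := by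
  intro cs
  induction cs with
  | nil => intro uc lc _; simp [specA]
  | cons c cs ih =>
    intro uc lc hmem
    have hc := hmem c (by simp)
    have hcs : ∀ c ∈ cs, c = 0 ∨ c = 1 ∨ c = 2 := fun x hx => hmem x (by simp [hx])
    rcases hc with h | h | h <;> subst h
    · simp [specA, ih _ _ hcs]
    · by_cases hu : uc > 0 <;> simp [specA, hu, ih _ _ hcs] <;> omega
    · simp [specA, ih _ _ hcs]

lemma sum_counts : ∀ cs : List Int, (∀ c ∈ cs, c = 0 ∨ c = 1 ∨ c = 2) →
    cs.sum = 2 * (List.count 2 cs : Int) + (List.count 1 cs : Int) := by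
  intro cs
  induction cs with
  | nil => simp
  | cons c cs ih =>
    intro hmem
    have hc := hmem c (by simp)
    have hcs : ∀ c ∈ cs, c = 0 ∨ c = 1 ∨ c = 2 := fun x hx => hmem x (by simp [hx])
    have := ih hcs
    rcases hc with h | h | h <;> subst h <;>
      simp [List.sum_cons, this] <;> omega

lemma counter_getD_two (colsum : List Int) :
    (colsum.foldl (fun (d : PySem.Dict Int Int) i => d.modify i 0 (· + 1))
      ((PySem.List.pyRange 0 3 1).foldl (fun d i => d.insert i 0) PySem.Dict.empty)).getD 2 0
      = (List.count 2 colsum : Int) := by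
  have h0 : ((PySem.List.pyRange 0 3 1).foldl
      (fun (d : PySem.Dict Int Int) i => d.insert i 0) PySem.Dict.empty).getD 2 0 = 0 := by rfl
  rw [PySem.Dict.getD_foldl_modify_add_one, h0, zero_add]

-- pointwise characterisation of A's rows: lengths
lemma specA_len : ∀ (cs : List Int) (uc lc : Int),
    (specA cs uc lc).1.length = cs.length ∧ (specA cs uc lc).2.1.length = cs.length := by
  intro cs
  induction cs with
  | nil => intro uc lc; simp [specA]
  | cons c cs ih =>
    intro uc lc
    simp only [specA]
    split_ifs <;> simp [ih]

-- pointwise characterisation of A's rows: values (under {0,1,2} entries)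
lemma specA_get : ∀ (cs : List Int) (uc lc : Int) (j : Nat) (hj : j < cs.length),
    (∀ c ∈ cs, c = 0 ∨ c = 1 ∨ c = 2) →
    (specA cs uc lc).1[j]? =
      some (if cs[j] = 2 then 1 else if cs[j] = 1 ∧ ((cs.take j).count 1 : Int) < uc then 1 else 0)
    ∧ (specA cs uc lc).2.1[j]? =
      some (if cs[j] = 2 then 1 else if cs[j] = 1 ∧ ¬ ((cs.take j).count 1 : Int) < uc then 1 else 0) := by
  intro cs
  induction cs with
  | nil => intro uc lc j hj; simp at hj
  | cons c cs ih =>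
    intro uc lc j hj hmem
    have hc := hmem c (by simp)
    have hcs : ∀ x ∈ cs, x = 0 ∨ x = 1 ∨ x = 2 := fun x hx => hmem x (by simp [hx])
    match j with
    | 0 =>
      rcases hc with h | h | h <;> subst h
      · by_cases hu : uc > 0 <;> simp [specA, hu] <;> omega
      · by_cases hu : uc > 0 <;> simp [specA, hu] <;> omega
      · simp [specA]
    | j + 1 =>
      have hj' : j < cs.length := by simpa using hj
      rcases hc with h | h | h <;> subst h
      · have := ih uc lc j hj' hcs
        simp [specA, this.1, this.2]
      · by_cases hu : uc > 0
        · have := ih (uc - 1) lc j hj' hcs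
          simp only [specA, if_neg (by norm_num : ¬(1:Int) = 2), if_neg (by norm_num : ¬(1:Int) = 0), if_pos hu]
          simp only [List.getElem?_cons_succ, List.getElem_cons_succ, List.take_succ_cons, List.count_cons]
          rw [this.1, this.2]
          constructor <;> congr 1
          · by_cases h1 : cs[j] = 2
            · simp [h1]
            · by_cases h2 : cs[j] = 1 <;> simp [h1, h2] <;> first | (constructor <;> intro <;> omega) | (split_ifs <;> omega)
          · by_cases h1 : cs[j] = 2
            · simp [h1]
            · by_cases h2 : cs[j] = 1 <;> simp [h1, h2] <;> first | (constructor <;> intro <;> omega) | (split_ifs <;> omega)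
        · have := ih uc (lc - 1) j hj' hcs
          simp only [specA, if_neg (by norm_num : ¬(1:Int) = 2), if_neg (by norm_num : ¬(1:Int) = 0), if_neg hu]
          simp only [List.getElem?_cons_succ, List.getElem_cons_succ, List.take_succ_cons, List.count_cons]
          rw [this.1, this.2]
          constructor <;> congr 1
          · by_cases h1 : cs[j] = 2
            · simp [h1]
            · by_cases h2 : cs[j] = 1 <;> simp [h1, h2] <;> first | (constructor <;> intro <;> omega) | (split_ifs <;> omega)
          · by_cases h1 : cs[j] = 2
            · simp [h1]
            · by_cases h2 : cs[j] = 1 <;> simp [h1, h2] <;> first | (constructor <;> intro <;> omega) | (split_ifs <;> omega)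
      · have := ih uc lc j hj' hcs
        simp [specA, this.1, this.2]

-- scatter lemma: folding pySetD 1 over nonnegative indices
lemma scatter_len : ∀ (idxs : List Int) (l : List Int),
    (idxs.foldl (fun l i => PySem.List.pySetD l i 1) l).length = l.length := by
  intro idxs
  induction idxs with
  | nil => intro l; rfl
  | cons i is ih => intro l; simp [ih, PySem.List.length_pySetD]

lemma scatter_get : ∀ (idxs : List Int) (l : List Int) (j : Nat), j < l.length →
    (∀ i ∈ idxs, 0 ≤ i) →
    (idxs.foldl (fun l i => PySem.List.pySetD l i 1) l)[j]? =
      if (j : Int) ∈ idxs then some 1 else l[j]? := by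
  intro idxs
  induction idxs with
  | nil => intro l j hj _; simp
  | cons i is ih =>
    intro l j hj hnn
    rw [List.foldl_cons, ih _ j (by simp [PySem.List.length_pySetD]; omega)
      (fun x hx => hnn x (by simp [hx]))]
    by_cases hmem : (j : Int) ∈ is
    · simp [hmem]
    · simp only [hmem, if_false, List.mem_cons, or_false]
      by_cases hij : (j : Int) = i
      · subst hij
        simp [PySem.List.pySetD_natCast, hj]
      · rw [if_neg hij,
          PySem.List.pySetD_of_nonneg _ _ (hnn i (by simp)), List.getElem?_set]
        have : ¬ i.toNat = j := by have := hnn i (by simp); omega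
        simp [this]

-- index lists: length of filtered enumerate = count
lemma enum_filter_len : ∀ (cs : List Int) (s : Int) (v : Int),
    (((PySem.List.enumerate cs s).filter (fun p => p.2 == v)).map (·.1)).length = cs.count v := by
  intro cs
  induction cs with
  | nil => intro s v; simp [PySem.List.enumerate_nil]
  | cons c cs ih =>
    intro s v
    rw [PySem.List.enumerate_cons]
    by_cases h : c = v <;> simp [List.filter_cons, h, ih, List.count_cons, beq_iff_eq]

lemma mem_twos (cs : List Int) (j : Nat) (hj : j < cs.length) :
    ((j : Int) ∈ (((PySem.List.enumerate cs 0).filter (fun p => p.2 == 2)).map (·.1)))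
      ↔ cs[j] = 2 := by
  simp only [List.mem_map, List.mem_filter, PySem.List.mem_enumerate_iff, beq_iff_eq]
  constructor
  · rintro ⟨p, ⟨⟨k, hk, rfl⟩, h2⟩, h1⟩
    simp only [zero_add] at h1 h2
    have : k = j := by exact_mod_cast h1
    subst this; exact h2
  · intro h
    exact ⟨((j:Int), cs[j]), ⟨⟨j, hj, by simp⟩, h⟩, rfl⟩

lemma mem_ones_ge (cs : List Int) (s : Int) (x : Int)
    (hx : x ∈ (((PySem.List.enumerate cs s).filter (fun p => p.2 == 1)).map (·.1))) : s ≤ x := by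
  simp only [List.mem_map, List.mem_filter, PySem.List.mem_enumerate_iff] at hx
  obtain ⟨p, ⟨⟨k, hk, rfl⟩, _⟩, rfl⟩ := hx
  simp

lemma mem_idx_nonneg (cs : List Int) (v x : Int)
    (hx : x ∈ (((PySem.List.enumerate cs 0).filter (fun p => p.2 == v)).map (·.1))) : 0 ≤ x := by
  simp only [List.mem_map, List.mem_filter, PySem.List.mem_enumerate_iff] at hx
  obtain ⟨p, ⟨⟨k, hk, rfl⟩, _⟩, rfl⟩ := hx
  simp

lemma mem_ones_take : ∀ (cs : List Int) (s : Int) (m : Nat) (j : Nat) (hj : j < cs.length),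
    ((s + (j : Int)) ∈ ((((PySem.List.enumerate cs s).filter (fun p => p.2 == 1)).map (·.1)).take m)
      ↔ cs[j]'hj = 1 ∧ (cs.take j).count 1 < m) := by
  intro cs
  induction cs with
  | nil => intro s m j hj; simp at hj
  | cons c cs ih =>
    intro s m j hj
    rw [PySem.List.enumerate_cons]
    by_cases hc : c = 1
    · subst hc
      simp only [List.filter_cons, beq_self_eq_true, if_true, ite_true, List.map_cons]
      match m with
      | 0 =>
        simp only [List.take_zero, List.not_mem_nil, false_iff]
        rintro ⟨-, h⟩; omega
      | m + 1 =>
        rw [List.take_succ_cons]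
        match j with
        | 0 => simp
        | j + 1 =>
          have hne : s + ((j:Nat) + 1 : Int) ≠ s := by omega
          push_cast
          rw [List.mem_cons]
          have := ih (s + 1) m j (by simpa using hj)
          constructor
          · rintro (h | h)
            · omega
            · rw [show s + ((j:Int) + 1) = (s+1) + (j:Int) by ring] at h
              rw [this] at h
              refine ⟨by simpa using h.1, ?_⟩
              simp [List.take_succ_cons, List.count_cons]
              omega
          · rintro ⟨h1, h2⟩
            right
            rw [show s + ((j:Int) + 1) = (s+1) + (j:Int) by ring, this]
            refine ⟨by simpa using h1, ?_⟩
            simp only [List.take_succ_cons, List.count_cons] at h2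
            simp at h2; omega
    · have hcb : ¬ ((c : Int) == 1) = true := by simp [hc]
      simp only [List.filter_cons, hcb, if_neg, Bool.false_eq_true, not_false_eq_true]
      match j with
      | 0 =>
        simp only [List.getElem_cons_zero, List.take_zero, List.count_nil]
        constructor
        · intro h
          have := mem_ones_ge cs (s+1) _ (List.mem_of_mem_take h)
          omega
        · rintro ⟨h, -⟩; exact absurd h hc
      | j + 1 =>
        push_cast
        rw [show s + ((j:Int) + 1) = (s+1) + (j:Int) by ring]
        rw [ih (s + 1) m j (by simpa using hj)]
        simp only [List.getElem_cons_succ, List.take_succ_cons, List.count_cons]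
        constructor
        · rintro ⟨h1, h2⟩; exact ⟨h1, by simp [hc]; omega⟩
        · rintro ⟨h1, h2⟩; refine ⟨h1, ?_⟩; simp [hc] at h2; omega

lemma mem_ones_drop : ∀ (cs : List Int) (s : Int) (m : Nat) (j : Nat) (hj : j < cs.length),
    ((s + (j : Int)) ∈ ((((PySem.List.enumerate cs s).filter (fun p => p.2 == 1)).map (·.1)).drop m)
      ↔ cs[j]'hj = 1 ∧ m ≤ (cs.take j).count 1) := by
  intro cs
  induction cs with
  | nil => intro s m j hj; simp at hj
  | cons c cs ih =>
    intro s m j hj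
    rw [PySem.List.enumerate_cons]
    by_cases hc : c = 1
    · subst hc
      simp only [List.filter_cons, beq_self_eq_true, if_true, ite_true, List.map_cons]
      match m with
      | 0 =>
        rw [List.drop_zero]
        match j with
        | 0 => simp
        | j + 1 =>
          push_cast
          have hne : s + ((j:Int) + 1) ≠ s := by omega
          rw [List.mem_cons, show s + ((j:Int) + 1) = (s+1) + (j:Int) by ring]
          have := ih (s + 1) 0 j (by simpa using hj)
          rw [List.drop_zero] at this
          rw [this]
          simp only [List.getElem_cons_succ, List.take_succ_cons, List.count_cons]
          constructor
          · rintro (h | h)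
            · omega
            · exact ⟨h.1, Nat.zero_le _⟩
          · intro h; right; exact ⟨h.1, Nat.zero_le _⟩
      | m + 1 =>
        rw [List.drop_succ_cons]
        match j with
        | 0 =>
          simp only [List.getElem_cons_zero, List.take_zero, List.count_nil]
          constructor
          · intro h
            have := mem_ones_ge cs (s+1) _ (List.mem_of_mem_drop h)
            omega
          · rintro ⟨-, h⟩; omega
        | j + 1 =>
          push_cast
          rw [show s + ((j:Int) + 1) = (s+1) + (j:Int) by ring,
            ih (s + 1) m j (by simpa using hj)]
          simp only [List.getElem_cons_succ, List.take_succ_cons, List.count_cons]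
          constructor
          · rintro ⟨h1, h2⟩; refine ⟨h1, ?_⟩; simp; omega
          · rintro ⟨h1, h2⟩; refine ⟨h1, ?_⟩; simp at h2; omega
    · have hcb : ¬ ((c : Int) == 1) = true := by simp [hc]
      simp only [List.filter_cons, hcb, if_neg, Bool.false_eq_true, not_false_eq_true]
      match j with
      | 0 =>
        simp only [List.getElem_cons_zero, List.take_zero, List.count_nil]
        constructor
        · intro h
          have := mem_ones_ge cs (s+1) _ (List.mem_of_mem_drop h)
          omega
        · rintro ⟨h, -⟩; exact absurd h hc
      | j + 1 =>
        push_cast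
        rw [show s + ((j:Int) + 1) = (s+1) + (j:Int) by ring,
          ih (s + 1) m j (by simpa using hj)]
        simp only [List.getElem_cons_succ, List.take_succ_cons, List.count_cons]
        constructor
        · rintro ⟨h1, h2⟩; refine ⟨h1, ?_⟩; simp [hc] at h2 ⊢; omega
        · rintro ⟨h1, h2⟩; refine ⟨h1, ?_⟩; simp [hc] at h2 ⊢; omega

-- ===== VERDICT (by name: the statement is the Claim_ definition above) =====
theorem reconstructMatrix2_spec : Claim_equal_reconstructMatrix2 := by
  intro upper lower colsum _ hpre
  unfold Spec_reconstructMatrix2 reconstructMatrix2 reconstructMatrix2_alt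
  by_cases hs : colsum.sum = upper + lower
  · have hmem := hpre hs
    simp only [if_neg (show ¬(colsum.sum ≠ upper + lower) from by omega)]
    simp only [counter_getD_two]
    have hbridgeA := bridgeA colsum [] [] [] (upper - (List.count 2 colsum : Int))
      (lower - (List.count 2 colsum : Int)) colsum rfl rfl rfl
    simp only [List.length_nil, Nat.cast_zero, List.nil_append] at hbridgeA
    rw [hbridgeA]
    dsimp only
    rw [enum_filter_len colsum 0 1, enum_filter_len colsum 0 2]
    set c2 : Int := (List.count 2 colsum : Int) with hc2
    set c1 : Int := (List.count 1 colsum : Int) with hc1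
    have hc1nn : (0:Int) ≤ c1 := by rw [hc1]; positivity
    have hsum : colsum.sum = 2 * c2 + c1 := sum_counts colsum hmem
    set k : Int := upper - c2 with hk
    have hlc := specA_lc colsum k (lower - c2) hmem
    rw [← hc1] at hlc
    have hlcval : (specA colsum k (lower - c2)).2.2.2 = min (max k 0) c1 - k := by
      rw [hlc]; omega
    by_cases hvalid : k < 0 ∨ c1 < k
    · rw [if_pos (show (specA colsum k (lower - c2)).2.2.2 ≠ 0 from by rw [hlcval]; omega),
        if_pos hvalid]
    · rw [if_neg (show ¬ ((specA colsum k (lower - c2)).2.2.2 ≠ 0) from by rw [hlcval]; omega),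
        if_neg hvalid]
      have hk0 : 0 ≤ k := by omega
      have hkc1 : k ≤ c1 := by omega
      set ones : List Int := ((PySem.List.enumerate colsum 0).filter (fun p => p.2 == 1)).map (·.1) with hones
      set twos : List Int := ((PySem.List.enumerate colsum 0).filter (fun p => p.2 == 2)).map (·.1) with htwos
      have htnn : ∀ i ∈ twos, (0:Int) ≤ i := fun i hi => mem_idx_nonneg colsum 2 i (htwos ▸ hi)
      have honn : ∀ i ∈ ones, (0:Int) ≤ i := fun i hi => mem_idx_nonneg colsum 1 i (hones ▸ hi)
      have hslt : PySem.List.slice ones none (some k) = ones.take k.toNat :=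
        PySem.List.slice_to ones hk0
      have hslf : PySem.List.slice ones (some k) none = ones.drop k.toNat :=
        PySem.List.slice_from ones hk0
      rw [hslt, hslf]
      have hlen_t1 : (twos.foldl (fun l i => PySem.List.pySetD l i 1)
          (List.replicate colsum.length (0:Int))).length = colsum.length := by
        rw [scatter_len]; simp
      congr 1
      · -- top rows
        apply List.ext_getElem?
        intro j
        by_cases hj : j < colsum.length
        · rw [scatter_get _ _ j (by rw [hlen_t1]; exact hj)
            (fun i hi => honn i (List.mem_of_mem_take hi)),
            scatter_get _ _ j (by simpa using hj) htnn,
            (specA_get colsum k (lower - c2) j hj hmem).1]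
          have hmt := mem_twos colsum j hj
          have hmo := mem_ones_take colsum 0 k.toNat j hj
          rw [zero_add] at hmo
          rw [← hones] at hmo
          rw [← htwos] at hmt
          have hcnt : (List.take j colsum).count 1 < k.toNat ↔
              ((List.take j colsum).count 1 : Int) < k := by omega
          rcases hmem colsum[j] (List.getElem_mem hj) with h | h | h
          · simp [hmo, hmt, h, hj]
          · by_cases hcond : ((List.take j colsum).count 1 : Int) < k <;>
              simp [hmo, hmt, hcnt, h, hcond, hj]
          · simp [hmo, hmt, h, hj]
        · rw [List.getElem?_eq_none, List.getElem?_eq_none]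
          · rw [scatter_len, hlen_t1]; omega
          · rw [(specA_len colsum k (lower - c2)).1]; omega
      · congr 1
        -- bottom rows
        apply List.ext_getElem?
        intro j
        by_cases hj : j < colsum.length
        · rw [scatter_get _ _ j (by rw [hlen_t1]; exact hj)
            (fun i hi => honn i (List.mem_of_mem_drop hi)),
            scatter_get _ _ j (by simpa using hj) htnn,
            (specA_get colsum k (lower - c2) j hj hmem).2]
          have hmt := mem_twos colsum j hj
          have hmo := mem_ones_drop colsum 0 k.toNat j hj
          rw [zero_add] at hmo
          rw [← hones] at hmo
          rw [← htwos] at hmt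
          have hcnt : k.toNat ≤ (List.take j colsum).count 1 ↔
              ¬ ((List.take j colsum).count 1 : Int) < k := by omega
          rcases hmem colsum[j] (List.getElem_mem hj) with h | h | h
          · simp [hmo, hmt, h, hj]
          · by_cases hcond : ((List.take j colsum).count 1 : Int) < k <;>
              simp [hmo, hmt, hcnt, h, hcond, hj]
          · simp [hmo, hmt, h, hj]
        · rw [List.getElem?_eq_none, List.getElem?_eq_none]
          · rw [scatter_len, hlen_t1]; omega
          · rw [(specA_len colsum k (lower - c2)).2]; omega
  · rw [if_pos (show colsum.sum ≠ upper + lower from by omega),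
      if_pos (show colsum.sum ≠ upper + lower from by omega)]
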